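-- pv_equiv track=rewrite | github.com/alex-1906/DocEE | src/candidate_generation/util.py | sent_ids_to_token_ids
-- ===== SOURCE A (Python) =====
-- def sent_ids_to_token_ids(text, token_map, spans, l_offset=1):
--     lens = [0,]
--     sen_len = 0
--     for sentence in text:
--         for token in sentence:
--             sen_len += 1
--         lens.append(sen_len)
--
--     adjusted_spans = []
--     for i, sent in enumerate(spans):
--         for span in sent:
--             start, end = span
--             start += lens[i] + l_offset
--             end += lens[i] + l_offset
--             adjusted_spans.append((token_map[start], token_map[end]))
--
--
--     return adjusted_spans
-- ===== SOURCE B (Python) =====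
-- def sent_ids_to_token_ids(text, token_map, spans, l_offset=1):
--     # Single running offset instead of a materialised prefix-sum table.
--     adjusted_spans = []
--     offset = l_offset
--     for i, sent in enumerate(spans):
--         for start, end in sent:
--             adjusted_spans.append((token_map[start + offset], token_map[end + offset]))
--         if i < len(text):
--             offset += len(text[i])
--     return adjusted_spans
-- ===== Notes on version B (the rewrite author's own statement) =====
-- stated objective: simpler
-- what changed: Replaces the precomputed prefix-sum table `lens` (built in a separate pass over all tokens) with a single running offset accumulator that is advanced after each sentence, fusing the two passes into one loop over spans.
import Mathlib
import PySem

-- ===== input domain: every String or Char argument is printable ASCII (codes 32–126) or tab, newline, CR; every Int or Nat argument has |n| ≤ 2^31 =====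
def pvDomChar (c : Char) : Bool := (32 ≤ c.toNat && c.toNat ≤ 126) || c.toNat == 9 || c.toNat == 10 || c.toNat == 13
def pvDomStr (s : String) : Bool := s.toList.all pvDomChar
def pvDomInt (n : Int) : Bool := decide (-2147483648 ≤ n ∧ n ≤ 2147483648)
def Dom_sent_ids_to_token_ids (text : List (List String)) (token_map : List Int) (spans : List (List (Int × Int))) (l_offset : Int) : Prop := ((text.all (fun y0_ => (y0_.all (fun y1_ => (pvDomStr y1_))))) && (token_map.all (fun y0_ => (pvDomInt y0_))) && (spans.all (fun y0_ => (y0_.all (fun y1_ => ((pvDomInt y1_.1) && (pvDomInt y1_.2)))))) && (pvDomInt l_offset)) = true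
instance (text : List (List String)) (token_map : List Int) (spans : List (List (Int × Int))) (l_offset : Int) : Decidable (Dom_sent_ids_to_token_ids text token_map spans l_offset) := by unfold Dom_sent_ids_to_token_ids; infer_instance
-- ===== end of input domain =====

-- B fuses A's separate prefix-sum table pass into one loop with a running offset (simpler, same cost).


-- ===== PORT A =====
-- lens = [0]; sen_len = 0; for sentence in text: for token in sentence: sen_len += 1; lens.append(sen_len)
def pvBuildLens (text : List (List String)) : List Int :=
  (text.foldl (fun (st : List Int × Int) sentence =>
      let sen_len := sentence.foldl (fun n _token => n + 1) st.2
      (st.1 ++ [sen_len], sen_len)) ([0], 0)).1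

-- body of "for span in sent" (pyGetD is the total form of list indexing; Pre_ keeps every index InRange)
def pvAStep (lens token_map : List Int) (l_offset : Int)
    (acc : List (Int × Int)) (q : Int × List (Int × Int)) : List (Int × Int) :=
  q.2.foldl (fun acc sp =>
      let start := sp.1 + PySem.List.pyGetD lens q.1 0 + l_offset
      let e := sp.2 + PySem.List.pyGetD lens q.1 0 + l_offset
      acc ++ [(PySem.List.pyGetD token_map start 0, PySem.List.pyGetD token_map e 0)]) acc

def sent_ids_to_token_ids (text : List (List String)) (token_map : List Int) (spans : List (List (Int × Int))) (l_offset : Int) : List (Int × Int) :=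
  let lens := pvBuildLens text
  (PySem.List.enumerate spans 0).foldl (pvAStep lens token_map l_offset) []

-- ===== PORT B =====
-- one enumerate loop; state = (adjusted_spans, offset); offset advanced after each sentence
def pvBStep (text : List (List String)) (token_map : List Int)
    (st : List (Int × Int) × Int) (q : Int × List (Int × Int)) : List (Int × Int) × Int :=
  let out := q.2.foldl (fun acc sp =>
      acc ++ [(PySem.List.pyGetD token_map (sp.1 + st.2) 0, PySem.List.pyGetD token_map (sp.2 + st.2) 0)]) st.1
  let offset := if q.1 < (text.length : Int) then st.2 + ((PySem.List.pyGetD text q.1 []).length : Int) else st.2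
  (out, offset)

def sent_ids_to_token_ids_alt (text : List (List String)) (token_map : List Int) (spans : List (List (Int × Int))) (l_offset : Int) : List (Int × Int) :=
  ((PySem.List.enumerate spans 0).foldl (pvBStep text token_map) ([], l_offset)).1

-- ===== PRECONDITION & SPEC =====
-- cumulative token count of the first k sentences (= A's lens[k])
def pvPrefix (text : List (List String)) (k : Nat) : Int :=
  ((text.take k).map (fun s => (s.length : Int))).sum

-- Pre_ excludes exactly the inputs where A raises an IndexError: a nonempty spans[i] with
-- i > len(text) (lens[i] out of range), or a token_map index out of Python's wraparound range.
def Pre_sent_ids_to_token_ids (text : List (List String)) (token_map : List Int) (spans : List (List (Int × Int))) (l_offset : Int) : Prop :=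
  ∀ q ∈ PySem.List.enumerate spans 0, ∀ sp ∈ q.2,
    q.1 ≤ (text.length : Int) ∧
    PySem.Raise.InRange token_map.length (sp.1 + pvPrefix text q.1.toNat + l_offset) ∧
    PySem.Raise.InRange token_map.length (sp.2 + pvPrefix text q.1.toNat + l_offset)
instance (text : List (List String)) (token_map : List Int) (spans : List (List (Int × Int))) (l_offset : Int) : Decidable (Pre_sent_ids_to_token_ids text token_map spans l_offset) := by unfold Pre_sent_ids_to_token_ids; infer_instance

def pvWitness_sent_ids_to_token_ids : List (List String) × List Int × (List (List (Int × Int))) × Int :=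
  ([["a", "b"], ["c"]], [10, 20, 30, 40], [[(0, 1)], [(0, 0)]], 1)

def Spec_sent_ids_to_token_ids (text : List (List String)) (token_map : List Int) (spans : List (List (Int × Int))) (l_offset : Int) (out : List (Int × Int)) : Prop := out = sent_ids_to_token_ids_alt text token_map spans l_offset
instance (text : List (List String)) (token_map : List Int) (spans : List (List (Int × Int))) (l_offset : Int) (out : List (Int × Int)) : Decidable (Spec_sent_ids_to_token_ids text token_map spans l_offset out) := by unfold Spec_sent_ids_to_token_ids; infer_instance

-- ===== CLAIM (what is proved, stated in full; the proofs are below) =====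
def Claim_equal_sent_ids_to_token_ids : Prop := ∀ (text : List (List String)) (token_map : List Int) (spans : List (List (Int × Int))) (l_offset : Int), Dom_sent_ids_to_token_ids text token_map spans l_offset → Pre_sent_ids_to_token_ids text token_map spans l_offset → Spec_sent_ids_to_token_ids text token_map spans l_offset (sent_ids_to_token_ids text token_map spans l_offset)

-- ===== LEMMAS AND PROOFS =====

-- counting loop: for token in sentence: sen_len += 1
theorem pvFoldlCount {a : Type} (xs : List a) (c : Int) :
    xs.foldl (fun n _ => n + 1) c = c + (xs.length : Int) := by
  induction xs generalizing c with
  | nil => simp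
  | cons x xs ih => simp [List.foldl_cons, ih]; ring

theorem pvPrefix_succ (text : List (List String)) (k : Nat) (hk : k < text.length) :
    pvPrefix text (k + 1) = pvPrefix text k + (text[k].length : Int) := by
  unfold pvPrefix
  rw [List.take_add_one, List.map_append, List.sum_append]
  simp [hk]

-- the lens-building fold with its inner counting loop already evaluated
def pvG (st : List Int × Int) (s : List String) : List Int × Int :=
  (st.1 ++ [st.2 + (s.length : Int)], st.2 + (s.length : Int))

theorem pvBuildLens_aux (text : List (List String)) :
    ∀ (acc : List Int) (c : Int),
    text.foldl pvG (acc, c)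
    = (acc ++ (List.range text.length).map (fun k => c + pvPrefix text (k + 1)),
       c + pvPrefix text text.length) := by
  induction text with
  | nil => intro acc c; simp [pvPrefix]
  | cons s ts ih =>
    intro acc c
    rw [List.foldl_cons]
    show ts.foldl pvG (acc ++ [c + (s.length : Int)], c + (s.length : Int)) = _
    rw [ih]
    have hpre : forall k, pvPrefix (s :: ts) (k + 1) = (s.length : Int) + pvPrefix ts k := by
      intro k; simp [pvPrefix, List.take_succ_cons]
    simp only [Prod.mk.injEq]
    refine ⟨?_, ?_⟩
    · rw [List.length_cons, List.range_succ_eq_map]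
      simp only [List.map_cons, List.map_map]
      rw [List.append_assoc]
      congr 1
      simp [hpre]
      exact ⟨by simp [pvPrefix], fun a _ => by ring⟩
    · rw [List.length_cons, hpre]; ring

theorem pvBuildLens_eq (text : List (List String)) :
    pvBuildLens text = (List.range (text.length + 1)).map (fun k => pvPrefix text k) := by
  unfold pvBuildLens
  have hfun : (fun (st : List Int × Int) (sentence : List String) =>
      let sen_len := sentence.foldl (fun n _token => n + 1) st.2
      (st.1 ++ [sen_len], sen_len)) = pvG := by
    funext st sentence
    simp only [pvG, pvFoldlCount]
  rw [hfun, pvBuildLens_aux]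
  rw [List.range_succ_eq_map]
  simp only [List.map_cons, List.map_map]
  have h0 : pvPrefix text 0 = 0 := by simp [pvPrefix]
  simp [h0, Function.comp]

theorem pvLens_get (text : List (List String)) (i : Int) (h0 : 0 ≤ i) (h1 : i ≤ (text.length : Int)) :
    PySem.List.pyGetD (pvBuildLens text) i 0 = pvPrefix text i.toNat := by
  rw [pvBuildLens_eq]
  rw [PySem.List.pyGetD_eq_getElem _ _ h0 (by simp; omega)]
  simp

-- the fused loop with running offset computes A's per-sentence output, by induction on the tail
theorem pvMain (text : List (List String)) (token_map : List Int) (l_offset : Int)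
    (rest : List (List (Int × Int))) :
    ∀ (i : Int) (acc : List (Int × Int)), 0 ≤ i →
    (∀ q ∈ PySem.List.enumerate rest i, q.2 ≠ [] → q.1 ≤ (text.length : Int)) →
    (PySem.List.enumerate rest i).foldl (pvAStep (pvBuildLens text) token_map l_offset) acc
    = ((PySem.List.enumerate rest i).foldl (pvBStep text token_map)
        (acc, l_offset + pvPrefix text (min i (text.length : Int)).toNat)).1 := by
  induction rest with
  | nil => intro i acc _ _; simp [PySem.List.enumerate_nil]
  | cons x xs ih =>
    intro i acc hi h
    rw [PySem.List.enumerate_cons]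
    simp only [List.foldl_cons]
    have hx : x ≠ [] → i ≤ (text.length : Int) := by
      intro hne
      exact h (i, x) (by rw [PySem.List.enumerate_cons]; exact List.mem_cons_self) hne
    have htail : ∀ q ∈ PySem.List.enumerate xs (i + 1), q.2 ≠ [] → q.1 ≤ (text.length : Int) := by
      intro q hq
      exact h q (by rw [PySem.List.enumerate_cons]; exact List.mem_cons_of_mem _ hq)
    by_cases hle : i ≤ (text.length : Int)
    · -- offsets agree: lens[i] = pvPrefix i, so the two per-sentence steps emit identical pairs
      have hoff : l_offset + pvPrefix text (min i (text.length : Int)).toNat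
          = PySem.List.pyGetD (pvBuildLens text) i 0 + l_offset := by
        rw [min_eq_left hle, pvLens_get text i hi hle]; ring
      have hstep : pvAStep (pvBuildLens text) token_map l_offset acc (i, x)
          = (pvBStep text token_map (acc, l_offset + pvPrefix text (min i (text.length : Int)).toNat) (i, x)).1 := by
        unfold pvAStep pvBStep
        simp only
        congr 1
        funext a sp
        rw [hoff]; ring_nf
      have hoff2 : (pvBStep text token_map (acc, l_offset + pvPrefix text (min i (text.length : Int)).toNat) (i, x)).2
          = l_offset + pvPrefix text (min (i + 1) (text.length : Int)).toNat := by
        unfold pvBStep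
        simp only
        by_cases hlt : i < (text.length : Int)
        · rw [if_pos hlt, min_eq_left hle,
              PySem.List.pyGetD_eq_getElem _ _ hi (by simpa using hlt)]
          have h1 : (min (i + 1) (text.length : Int)).toNat = i.toNat + 1 := by omega
          rw [h1, pvPrefix_succ text i.toNat (by omega)]
          ring
        · rw [if_neg hlt]
          have harg : (min (i + 1) (text.length : Int)).toNat = (min i (text.length : Int)).toNat := by omega
          rw [harg]
      have heta : pvBStep text token_map (acc, l_offset + pvPrefix text (min i (text.length : Int)).toNat) (i, x)
          = ((pvBStep text token_map (acc, l_offset + pvPrefix text (min i (text.length : Int)).toNat) (i, x)).1,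
             l_offset + pvPrefix text (min (i + 1) (text.length : Int)).toNat) := by
        rw [← hoff2]
      rw [hstep, ih (i + 1) _ (by omega) htail]
      conv_rhs => rw [heta]
    · -- i > len(text): the sentence must be empty, so both steps leave the output untouched
      have hxe : x = [] := by
        by_contra hne
        exact hle (hx hne)
      subst hxe
      have hnlt : ¬ i < (text.length : Int) := by omega
      have hstep : pvAStep (pvBuildLens text) token_map l_offset acc (i, ([] : List (Int × Int)))
          = acc := by unfold pvAStep; simp
      have hbstep : pvBStep text token_map (acc, l_offset + pvPrefix text (min i (text.length : Int)).toNat) (i, ([] : List (Int × Int)))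
          = (acc, l_offset + pvPrefix text (min i (text.length : Int)).toNat) := by
        unfold pvBStep; simp [hnlt]
      rw [hstep, hbstep, ih (i + 1) _ (by omega) htail]
      have harg : (min (i + 1) (text.length : Int)).toNat = (min i (text.length : Int)).toNat := by omega
      rw [harg]

-- ===== VERDICT (by name: the statement is the Claim_ definition above) =====
theorem sent_ids_to_token_ids_spec : Claim_equal_sent_ids_to_token_ids := by
  intro text token_map spans l_offset _hdom hpre
  unfold Spec_sent_ids_to_token_ids sent_ids_to_token_ids sent_ids_to_token_ids_alt
  have h := pvMain text token_map l_offset spans 0 [] (by omega)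
    (fun q hq hne => (hpre q hq ((q.2.exists_mem_of_ne_nil hne).choose)
      (q.2.exists_mem_of_ne_nil hne).choose_spec).1)
  rw [h]
  have harg : (min (0 : Int) (text.length : Int)).toNat = 0 := by omega
  rw [harg]
  have h0 : pvPrefix text 0 = 0 := by simp [pvPrefix]
  rw [h0, add_zero]
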